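-- pv_equiv track=rewrite | github.com/mikeconroy/advent-of-code-22 | day17/solve.py | drop_rock
-- ===== SOURCE A (Python) =====
-- def drop_rock(rock, settled_rocks):
--     new_rock = set()
--     for point in rock:
--         new_point = (point[0], point[1] - 1)
--         if new_point in settled_rocks:
--             return rock, False
--         else:
--             new_rock.add(new_point)
--     return new_rock, True
-- ===== SOURCE B (Python) =====
-- def drop_rock(rock, settled_rocks):
--     # Collision iff some settled cell has the rock directly above it:
--     # (x, y-1) in settled for some rock point (x, y)  <=>  (x, y+1) in rock for some settled (x, y).
--     for s in settled_rocks: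
--         if (s[0], s[1] + 1) in rock:
--             return rock, False
--     return {(p[0], p[1] - 1) for p in rock}, True
-- ===== Notes on version B (the rewrite author's own statement) =====
-- stated objective: alternative
-- what changed: B inverts the collision test: it scans the settled obstacles for one whose cell directly above lies in the rock (instead of shifting each rock point down and testing it against settled while accumulating), and only builds the shifted set once no obstacle blocks the move.
import Mathlib
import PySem

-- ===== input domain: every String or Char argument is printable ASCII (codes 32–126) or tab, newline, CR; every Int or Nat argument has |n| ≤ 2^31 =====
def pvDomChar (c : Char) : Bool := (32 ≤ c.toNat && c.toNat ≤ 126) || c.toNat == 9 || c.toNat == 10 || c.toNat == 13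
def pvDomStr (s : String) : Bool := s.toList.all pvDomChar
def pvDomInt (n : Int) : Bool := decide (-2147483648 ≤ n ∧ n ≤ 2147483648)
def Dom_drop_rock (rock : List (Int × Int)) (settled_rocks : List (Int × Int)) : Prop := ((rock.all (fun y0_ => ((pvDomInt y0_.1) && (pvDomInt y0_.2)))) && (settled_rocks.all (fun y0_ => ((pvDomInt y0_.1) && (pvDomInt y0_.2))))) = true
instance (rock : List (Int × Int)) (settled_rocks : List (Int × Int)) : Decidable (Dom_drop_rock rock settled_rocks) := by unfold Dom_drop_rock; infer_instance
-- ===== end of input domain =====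

-- B inverts the collision test: it scans the settled obstacles for one whose cell directly
-- above lies in the rock, and only then builds the shifted set (objective: alternative).

-- ===== PORT A =====
-- the 'for point in rock' loop: accumulates new_rock, early return on collision
def dropRockGo (rock settled_rocks : List (Int × Int)) :
    List (Int × Int) → PySem.Set (Int × Int) → (List (Int × Int)) × Bool
  | [], new_rock => (new_rock, true)
  | point :: rest, new_rock =>
    let new_point := (point.1, point.2 - 1)
    if new_point ∈ settled_rocks then (rock, false)
    else dropRockGo rock settled_rocks rest (PySem.Set.add new_rock new_point)

def drop_rock (rock : List (Int × Int)) (settled_rocks : List (Int × Int)) : (List (Int × Int)) × Bool :=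
  dropRockGo rock settled_rocks rock PySem.Set.empty

-- ===== PORT B =====
-- the 'for s in settled_rocks' scan: is some obstacle's cell-above occupied by the rock?
def blockedScan (rock : List (Int × Int)) : List (Int × Int) → Bool
  | [] => false
  | s :: rest => if (s.1, s.2 + 1) ∈ rock then true else blockedScan rock rest

def drop_rock_alt (rock : List (Int × Int)) (settled_rocks : List (Int × Int)) : (List (Int × Int)) × Bool :=
  if blockedScan rock settled_rocks then (rock, false)
  else (PySem.Set.ofList (rock.map (fun p => (p.1, p.2 - 1))), true)

-- ===== PRECONDITION & SPEC =====
def Spec_drop_rock (rock : List (Int × Int)) (settled_rocks : List (Int × Int)) (out : (List (Int × Int)) × Bool) : Prop := out = drop_rock_alt rock settled_rocks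
instance (rock : List (Int × Int)) (settled_rocks : List (Int × Int)) (out : (List (Int × Int)) × Bool) : Decidable (Spec_drop_rock rock settled_rocks out) := by unfold Spec_drop_rock; infer_instance

-- ===== CLAIM (what is proved, stated in full; the proofs are below) =====
def Claim_equal_drop_rock : Prop := ∀ (rock : List (Int × Int)) (settled_rocks : List (Int × Int)), Dom_drop_rock rock settled_rocks → Spec_drop_rock rock settled_rocks (drop_rock rock settled_rocks)

-- ===== LEMMAS AND PROOFS =====

-- closed form of A's loop: early exit iff some shifted point collides; otherwise fold all adds
theorem dropRockGo_eq (rock settled_rocks : List (Int × Int)) :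
    ∀ (points : List (Int × Int)) (acc : PySem.Set (Int × Int)),
      dropRockGo rock settled_rocks points acc =
        if ∀ p ∈ points, (p.1, p.2 - 1) ∉ settled_rocks then
          (points.foldl (fun s p => PySem.Set.add s (p.1, p.2 - 1)) acc, true)
        else (rock, false) := by
  intro points
  induction points with
  | nil => intro acc; simp [dropRockGo]
  | cons p rest ih =>
    intro acc
    by_cases h : (p.1, p.2 - 1) ∈ settled_rocks
    · simp [dropRockGo, h]
    · simp [dropRockGo, h, ih]
      simp only [List.forall_mem_cons, h, not_false_iff, true_and]

-- B's scan finds a blocking obstacle iff some shifted rock point collides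
theorem blockedScan_iff (rock : List (Int × Int)) :
    ∀ (settled : List (Int × Int)),
      blockedScan rock settled = true ↔ ∃ p ∈ rock, (p.1, p.2 - 1) ∈ settled := by
  intro settled
  induction settled with
  | nil => simp [blockedScan]
  | cons s rest ih =>
    by_cases h : (s.1, s.2 + 1) ∈ rock
    · simp only [blockedScan, h, if_true, true_iff]
      refine ⟨(s.1, s.2 + 1), h, ?_⟩
      simp
    · simp only [blockedScan, h, if_false, ih]
      constructor
      · rintro ⟨p, hp, hps⟩; exact ⟨p, hp, List.mem_cons_of_mem _ hps⟩
      · rintro ⟨p, hp, hps⟩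
        rcases List.mem_cons.mp hps with he | hm
        · exfalso; apply h
          have h1 : p.1 = s.1 := by rw [← he]
          have h2 : p.2 - 1 = s.2 := by rw [← he]
          have hpe : (s.1, s.2 + 1) = p := by
            rw [← h1]; rw [show s.2 + 1 = p.2 by omega]
          exact hpe ▸ hp
        · exact ⟨p, hp, hm⟩

theorem drop_rock_spec : Claim_equal_drop_rock := by
  intro rock settled_rocks _
  unfold Spec_drop_rock drop_rock drop_rock_alt
  rw [dropRockGo_eq]
  have hfold : rock.foldl (fun s p => PySem.Set.add s (p.1, p.2 - 1)) ([] : PySem.Set (Int × Int))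
      = PySem.Set.ofList (rock.map (fun p => (p.1, p.2 - 1))) := by
    simp [PySem.Set.ofList, List.foldl_map]
  by_cases hc : ∀ p ∈ rock, (p.1, p.2 - 1) ∉ settled_rocks
  · have hb : blockedScan rock settled_rocks = false := by
      rw [Bool.eq_false_iff]
      intro h
      obtain ⟨p, hp, hps⟩ := (blockedScan_iff rock settled_rocks).mp h
      exact hc p hp hps
    rw [if_pos hc, hb]
    simp only [Bool.false_eq_true, if_false]
    exact congrArg (fun s => (s, true)) hfold
  · have hb : blockedScan rock settled_rocks = true := by
      rw [blockedScan_iff]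
      push Not at hc
      obtain ⟨p, hp, hps⟩ := hc
      exact ⟨p, hp, hps⟩
    rw [if_neg hc, hb]
    simp
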